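-- pv_equiv track=rewrite | github.com/tockata/HackBulgaria | week7/03-string_matrix.py | string_matrix
-- ===== SOURCE A (Python) =====
-- def string_matrix(matrix_width, strings):
--     result = ""
--
--     for i in range(0, matrix_width):
--         result += "|"
--         for j in range(0, matrix_width):
--             if j < len(strings[i]):
--                 result += " " + strings[i][j] + " |"
--             else:
--                 result += " X |"
--         result += "\n"
--
--     return result
-- ===== SOURCE B (Python) =====
-- def string_matrix(matrix_width, strings):
--     w = max(matrix_width, 0)
--     rows = []
--     for s in strings[:w]:
--         padded = s[:w] + "X" * (w - len(s))
--         rows.append("|" + "".join(" " + c + " |" for c in padded) + "\n")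
--     return "".join(rows)
-- ===== Notes on version B (the rewrite author's own statement) =====
-- stated objective: simpler
-- what changed: B precomputes each row's padded cell string (truncate to width, pad with 'X') and formats every cell uniformly, replacing A's character-indexed inner loop with its per-cell if/else branch; rows are built as a list and joined instead of growing one string.
import Mathlib
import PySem

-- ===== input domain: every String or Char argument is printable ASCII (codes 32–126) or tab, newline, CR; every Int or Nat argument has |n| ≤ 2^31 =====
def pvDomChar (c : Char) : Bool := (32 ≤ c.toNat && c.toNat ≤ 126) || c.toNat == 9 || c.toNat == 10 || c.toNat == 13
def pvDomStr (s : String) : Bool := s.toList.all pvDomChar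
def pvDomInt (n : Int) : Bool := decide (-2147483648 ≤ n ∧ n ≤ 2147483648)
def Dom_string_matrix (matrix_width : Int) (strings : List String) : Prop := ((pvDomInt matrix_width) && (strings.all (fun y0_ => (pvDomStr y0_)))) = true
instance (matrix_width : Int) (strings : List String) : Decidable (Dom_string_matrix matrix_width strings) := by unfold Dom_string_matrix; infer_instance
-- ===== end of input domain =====

-- B pads/truncates each row string to the width up front and formats every cell uniformly,
-- replacing A's per-cell if/else inner loop (objective: simpler decomposition; not faster).

-- ===== PORT A =====
-- Literal port of A: outer loop over range(0, w), '|' then an inner loop over range(0, w)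
-- appending per-cell, then '\n'; strings are List Char on the Lean side (String.append is opaque).
def string_matrix (matrix_width : Int) (strings : List String) : String :=
  let result : List Char :=
    (PySem.List.pyRange 0 matrix_width 1).foldl (fun result i =>
      let s : List Char := ((PySem.List.pyGet? strings i).getD "").toList
      let result := result ++ ['|']
      let result := (PySem.List.pyRange 0 matrix_width 1).foldl (fun result j =>
        if j < (s.length : Int) then
          result ++ [' ', PySem.List.pyGetD s j ' ', ' ', '|']
        else
          result ++ [' ', 'X', ' ', '|']) result
      result ++ ['\n']) []
  String.ofList result

-- ===== PORT B =====
-- Literal port of Source B: w = max(matrix_width, 0); for each s in strings[:w],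
-- padded = s[:w] + "X"*(w - len s); row = "|" + join(" c |" per char) + "\n"; join the rows.
def string_matrix_alt (matrix_width : Int) (strings : List String) : String :=
  let w : Nat := (max matrix_width 0).toNat
  let rows : List (List Char) := (strings.take w).map (fun s =>
    let padded := s.toList.take w ++ List.replicate (w - s.toList.length) 'X'
    '|' :: (padded.flatMap (fun c => [' ', c, ' ', '|']) ++ ['\n']))
  String.ofList rows.flatten

-- ===== PRECONDITION & SPEC =====
-- Pre_ excludes exactly the inputs where A raises IndexError: 0 < matrix_width with fewer strings.
def Pre_string_matrix (matrix_width : Int) (strings : List String) : Prop :=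
  matrix_width ≤ (strings.length : Int) ∨ matrix_width ≤ 0
instance (matrix_width : Int) (strings : List String) : Decidable (Pre_string_matrix matrix_width strings) := by unfold Pre_string_matrix; infer_instance
def pvWitness_string_matrix : Int × List String := (2, ["a", "bcd"])

def Spec_string_matrix (matrix_width : Int) (strings : List String) (out : String) : Prop := out = string_matrix_alt matrix_width strings
instance (matrix_width : Int) (strings : List String) (out : String) : Decidable (Spec_string_matrix matrix_width strings out) := by unfold Spec_string_matrix; infer_instance

-- ===== CLAIM (what is proved, stated in full; the proofs are below) =====
def Claim_equal_string_matrix : Prop := ∀ (matrix_width : Int) (strings : List String), Dom_string_matrix matrix_width strings → Pre_string_matrix matrix_width strings → Spec_string_matrix matrix_width strings (string_matrix matrix_width strings)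

-- ===== LEMMAS AND PROOFS =====

-- One cell of the output.
def pvCell (c : Char) : List Char := [' ', c, ' ', '|']

-- The padded row content B builds.
def pvPadded (s : List Char) (n : Nat) : List Char := s.take n ++ List.replicate (n - s.length) 'X'

lemma pvPadded_succ (s : List Char) (n : Nat) :
    pvPadded s (n + 1) = pvPadded s n ++ [if h : n < s.length then s[n] else 'X'] := by
  unfold pvPadded
  split_ifs with h
  · rw [List.take_add_one, Nat.sub_eq_zero_of_le (by omega), Nat.sub_eq_zero_of_le (by omega)]
    simp [List.getElem?_eq_getElem h]
  · rw [List.take_of_length_le (by omega), List.take_of_length_le (by omega),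
      Nat.succ_sub (by omega), List.replicate_succ']
    simp

-- A's inner loop over range(0, n) equals appending the uniformly-formatted padded row.
lemma pvInner (s : List Char) (n : Nat) (acc : List Char) :
    (PySem.List.pyRange 0 (n : Int) 1).foldl (fun r j =>
        if j < (s.length : Int) then r ++ [' ', PySem.List.pyGetD s j ' ', ' ', '|']
        else r ++ [' ', 'X', ' ', '|']) acc
      = acc ++ (pvPadded s n).flatMap pvCell := by
  induction n generalizing acc with
  | zero => simp [PySem.List.pyRange_one_eq_nil, pvPadded]
  | succ n ih =>
    rw [show ((n + 1 : Nat) : Int) = (n : Int) + 1 by push_cast; ring,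
      PySem.List.pyRange_one_succ_right (by positivity), List.foldl_append, ih,
      pvPadded_succ, List.flatMap_append]
    simp only [List.foldl_cons, List.foldl_nil]
    by_cases h : n < s.length
    · have h' : ((n : Int) < (s.length : Int)) := by exact_mod_cast h
      simp [h, h', pvCell]
    · have h' : ¬ ((n : Int) < (s.length : Int)) := by exact_mod_cast h
      simp [h, h', pvCell]

-- A's inner loop with the original Int bound.
lemma pvInnerI (s : List Char) (mw : Int) (acc : List Char) :
    (PySem.List.pyRange 0 mw 1).foldl (fun r j =>
        if j < (s.length : Int) then r ++ [' ', PySem.List.pyGetD s j ' ', ' ', '|']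
        else r ++ [' ', 'X', ' ', '|']) acc
      = acc ++ (pvPadded s mw.toNat).flatMap pvCell := by
  rcases le_or_gt 0 mw with h | h
  · have hmw := pvInner s mw.toNat acc
    rw [show ((mw.toNat : Nat) : Int) = mw from by omega] at hmw
    exact hmw
  · rw [PySem.List.pyRange_one_eq_nil (by omega)]
    have h0 : mw.toNat = 0 := by omega
    simp [h0, pvPadded]

-- The row B builds for string s.
def pvRow (s : List Char) (n : Nat) : List Char :=
  '|' :: ((pvPadded s n).flatMap pvCell ++ ['\n'])

-- A's outer loop over range(0, n) equals concatenating B's rows, when the width fits.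
lemma pvOuter (strings : List String) (mw : Int) (n : Nat) (hn : n ≤ strings.length)
    (acc : List Char) :
    (PySem.List.pyRange 0 (n : Int) 1).foldl (fun r i =>
        let s : List Char := ((PySem.List.pyGet? strings i).getD "").toList
        let r := r ++ ['|']
        let r := (PySem.List.pyRange 0 mw 1).foldl (fun r j =>
          if j < (s.length : Int) then r ++ [' ', PySem.List.pyGetD s j ' ', ' ', '|']
          else r ++ [' ', 'X', ' ', '|']) r
        r ++ ['\n']) acc
      = acc ++ ((strings.take n).map (fun s => pvRow s.toList mw.toNat)).flatten := by
  induction n generalizing acc with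
  | zero => simp [PySem.List.pyRange_one_eq_nil]
  | succ n ih =>
    rw [show ((n + 1 : Nat) : Int) = (n : Int) + 1 by push_cast; ring,
      PySem.List.pyRange_one_succ_right (by positivity), List.foldl_append, ih (by omega),
      List.take_add_one, List.getElem?_eq_getElem (by omega : n < strings.length)]
    simp only [List.foldl_cons, List.foldl_nil]
    have hget : PySem.List.pyGet? strings (n : Int) = some strings[n] := by
      rw [PySem.List.pyGet?_natCast, List.getElem?_eq_getElem (by omega : n < strings.length)]
      rfl
    simp only [hget, Option.getD_some, Option.toList_some, List.map_append, List.flatten_append,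
      List.map_cons, List.map_nil, List.flatten_cons, List.flatten_nil]
    rw [pvInnerI]
    simp only [pvRow, List.append_assoc, List.cons_append, List.nil_append, List.append_nil]
    rfl

-- ===== VERDICT (by name: the statement is the Claim_ definition above) =====
theorem string_matrix_spec : Claim_equal_string_matrix := by
  intro mw strings _ hpre
  unfold Spec_string_matrix string_matrix string_matrix_alt
  rcases le_or_gt mw 0 with hmw | hmw
  · rw [PySem.List.pyRange_one_eq_nil (by omega)]
    have : (max mw 0).toNat = 0 := by omega
    simp [this]
  · have hle : mw ≤ (strings.length : Int) := by
      rcases hpre with h | h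
      · exact h
      · omega
    have hn : mw.toNat ≤ strings.length := by omega
    have houter := pvOuter strings mw mw.toNat hn []
    rw [show ((mw.toNat : Nat) : Int) = mw from by omega] at houter
    rw [houter]
    simp [pvRow, pvPadded, show (max mw 0).toNat = mw.toNat from by omega]
    rfl
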